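-- pv_equiv track=rewrite | github.com/phungnganha/CZ1003-MiniProject | signup_login.py | check_birthday
-- ===== SOURCE A (Python) =====
-- def check_birthday(birthday_input):
--     if len(birthday_input) == 8: #  DDMMYYY
--         bdate_list = [x for x in birthday_input]
--         day = bdate_list[0] + bdate_list[1]  # DD string
--         month = bdate_list[2] + bdate_list[3] # MM string
--         year = bdate_list[4] + bdate_list[5] + bdate_list[6] + bdate_list[7] #YYYY string
--         month_31 = [1,3,5,7,8,10,12] # month that has 31 days
--         month_30 = [4,6,9,11] # month that has 30 days
--         try:
--             d = int(day)
--             m = int(month)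
--             y = int(year)
--             if (m in month_31) and (1<=d<=31) and (0<=y<=2019):  # 31-day months
--                 return birthday_input
--             elif (m in month_30) and (1<=d<=30) and (0<=y<=2019):  # 30-day months
--                 return birthday_input
--             elif (m == 2) and (1<=d<=29) and (0<=y<=2019) and (y%4 == 0): # February in leap year
--                 return birthday_input
--             elif (m == 2) and (1<=d<=28) and (0<=y<=2019) and (y%4 != 0):  # February in leap year
--                 return birthday_input
--             else:
--                 return 'wrong date'
--         except ValueError: # other format errors
--             return 'wrong format'
--     else:
--         return 'wrong format'
-- ===== SOURCE B (Python) =====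
-- def check_birthday(birthday_input):
--     if len(birthday_input) != 8:
--         return 'wrong format'
--     try:
--         d = int(birthday_input[0:2])
--         m = int(birthday_input[2:4])
--         y = int(birthday_input[4:8])
--     except ValueError:
--         return 'wrong format'
--     if not (1 <= m <= 12 and 0 <= y <= 2019):
--         return 'wrong date'
--     maxday = 28 + (y % 4 == 0) if m == 2 else 30 + (m + m // 8) % 2
--     return birthday_input if 1 <= d <= maxday else 'wrong date'
-- ===== Notes on version B (the rewrite author's own statement) =====
-- stated objective: simpler
-- what changed: Drops A's month lists and four-way branch chain entirely: the month length is computed by the arithmetic formula 30 + (m + m//8) % 2 (February from the y%4 rule) after one 1<=m<=12, 0<=y<=2019 guard, followed by a single day range check.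
import Mathlib
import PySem

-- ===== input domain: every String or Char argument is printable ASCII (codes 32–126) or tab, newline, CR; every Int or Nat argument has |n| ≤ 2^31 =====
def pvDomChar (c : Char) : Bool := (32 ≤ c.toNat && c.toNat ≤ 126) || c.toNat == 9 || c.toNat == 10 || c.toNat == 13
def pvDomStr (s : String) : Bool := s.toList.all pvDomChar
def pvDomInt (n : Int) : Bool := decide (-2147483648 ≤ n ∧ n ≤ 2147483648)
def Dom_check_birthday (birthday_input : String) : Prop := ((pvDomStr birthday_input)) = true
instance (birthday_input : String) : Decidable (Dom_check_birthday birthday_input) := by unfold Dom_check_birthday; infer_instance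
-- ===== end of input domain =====

-- B replaces A's month lists and four-way branch chain with a single arithmetic formula 30 + (m + m//8) % 2 for the month length (February from the y%4 rule) and one range check (simpler).

-- ===== PORT A =====
-- indices 0..7 are in range because the length-8 guard holds; the .getD ' ' default is never used
def check_birthday (birthday_input : String) : String :=
  if PySem.Str.len birthday_input = 8 then
    let bl := birthday_input.toList
    let day := [(PySem.List.pyGet? bl 0).getD ' ', (PySem.List.pyGet? bl 1).getD ' ']
    let month := [(PySem.List.pyGet? bl 2).getD ' ', (PySem.List.pyGet? bl 3).getD ' ']
    let year := [(PySem.List.pyGet? bl 4).getD ' ', (PySem.List.pyGet? bl 5).getD ' ',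
                 (PySem.List.pyGet? bl 6).getD ' ', (PySem.List.pyGet? bl 7).getD ' ']
    let month_31 : List Int := [1, 3, 5, 7, 8, 10, 12]
    let month_30 : List Int := [4, 6, 9, 11]
    match PySem.Int.ofChars? day, PySem.Int.ofChars? month, PySem.Int.ofChars? year with
    | some d, some m, some y =>
        if m ∈ month_31 ∧ 1 ≤ d ∧ d ≤ 31 ∧ 0 ≤ y ∧ y ≤ 2019 then birthday_input
        else if m ∈ month_30 ∧ 1 ≤ d ∧ d ≤ 30 ∧ 0 ≤ y ∧ y ≤ 2019 then birthday_input
        else if m = 2 ∧ 1 ≤ d ∧ d ≤ 29 ∧ 0 ≤ y ∧ y ≤ 2019 ∧ PySem.Int.mod y 4 = 0 then birthday_input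
        else if m = 2 ∧ 1 ≤ d ∧ d ≤ 28 ∧ 0 ≤ y ∧ y ≤ 2019 ∧ PySem.Int.mod y 4 ≠ 0 then birthday_input
        else "wrong date"
    | _, _, _ => "wrong format"
  else "wrong format"

-- ===== PORT B =====
def check_birthday_alt (birthday_input : String) : String :=
  if PySem.Str.len birthday_input ≠ 8 then "wrong format"
  else
    let bl := birthday_input.toList
    match PySem.Int.ofChars? (PySem.List.slice bl (some 0) (some 2)) with
    | none => "wrong format"
    | some d =>
      match PySem.Int.ofChars? (PySem.List.slice bl (some 2) (some 4)) with
      | none => "wrong format"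
      | some m =>
        match PySem.Int.ofChars? (PySem.List.slice bl (some 4) (some 8)) with
        | none => "wrong format"
        | some y =>
          if ¬ (1 ≤ m ∧ m ≤ 12 ∧ 0 ≤ y ∧ y ≤ 2019) then "wrong date"
          else
            -- Python bool arithmetic 28 + (y % 4 == 0) is ported as 28 + (if … then 1 else 0)
            let maxday : Int :=
              if m = 2 then 28 + (if PySem.Int.mod y 4 = 0 then 1 else 0)
              else 30 + PySem.Int.mod (m + PySem.Int.floordiv m 8) 2
            if 1 ≤ d ∧ d ≤ maxday then birthday_input else "wrong date"

-- ===== PRECONDITION & SPEC =====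
def Spec_check_birthday (birthday_input : String) (out : String) : Prop := out = check_birthday_alt birthday_input
instance (birthday_input : String) (out : String) : Decidable (Spec_check_birthday birthday_input out) := by unfold Spec_check_birthday; infer_instance

-- ===== CLAIM (what is proved, stated in full; the proofs are below) =====
def Claim_equal_check_birthday : Prop := ∀ (birthday_input : String), Dom_check_birthday birthday_input → Spec_check_birthday birthday_input (check_birthday birthday_input)

-- ===== LEMMAS AND PROOFS =====

-- A's four-branch chain over month lists agrees with B's arithmetic month-length formula for all parsed d, m, y
lemma branches_eq (s : String) (d m y : Int) :
    (if m ∈ ([1, 3, 5, 7, 8, 10, 12] : List Int) ∧ 1 ≤ d ∧ d ≤ 31 ∧ 0 ≤ y ∧ y ≤ 2019 then s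
     else if m ∈ ([4, 6, 9, 11] : List Int) ∧ 1 ≤ d ∧ d ≤ 30 ∧ 0 ≤ y ∧ y ≤ 2019 then s
     else if m = 2 ∧ 1 ≤ d ∧ d ≤ 29 ∧ 0 ≤ y ∧ y ≤ 2019 ∧ PySem.Int.mod y 4 = 0 then s
     else if m = 2 ∧ 1 ≤ d ∧ d ≤ 28 ∧ 0 ≤ y ∧ y ≤ 2019 ∧ PySem.Int.mod y 4 ≠ 0 then s
     else "wrong date") =
    (if ¬ (1 ≤ m ∧ m ≤ 12 ∧ 0 ≤ y ∧ y ≤ 2019) then "wrong date"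
     else if 1 ≤ d ∧ d ≤ (if m = 2 then 28 + (if PySem.Int.mod y 4 = 0 then 1 else 0)
                          else 30 + PySem.Int.mod (m + PySem.Int.floordiv m 8) 2) then s
     else "wrong date") := by
  simp only [List.mem_cons, List.not_mem_nil, or_false]
  by_cases hm : 1 ≤ m ∧ m ≤ 12
  · obtain ⟨h1, h2⟩ := hm
    interval_cases m <;>
      norm_num [show (PySem.Int.mod ((1:Int) + PySem.Int.floordiv 1 8) 2) = 1 from by decide,
      show (PySem.Int.mod ((3:Int) + PySem.Int.floordiv 3 8) 2) = 1 from by decide,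
      show (PySem.Int.mod ((4:Int) + PySem.Int.floordiv 4 8) 2) = 0 from by decide,
      show (PySem.Int.mod ((5:Int) + PySem.Int.floordiv 5 8) 2) = 1 from by decide,
      show (PySem.Int.mod ((6:Int) + PySem.Int.floordiv 6 8) 2) = 0 from by decide,
      show (PySem.Int.mod ((7:Int) + PySem.Int.floordiv 7 8) 2) = 1 from by decide,
      show (PySem.Int.mod ((8:Int) + PySem.Int.floordiv 8 8) 2) = 1 from by decide,
      show (PySem.Int.mod ((9:Int) + PySem.Int.floordiv 9 8) 2) = 0 from by decide,
      show (PySem.Int.mod ((10:Int) + PySem.Int.floordiv 10 8) 2) = 1 from by decide,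
      show (PySem.Int.mod ((11:Int) + PySem.Int.floordiv 11 8) 2) = 0 from by decide,
      show (PySem.Int.mod ((12:Int) + PySem.Int.floordiv 12 8) 2) = 1 from by decide] <;>
      split_ifs <;> first | rfl | omega
  · split_ifs <;> first | rfl | omega

-- a length-8 list is an explicit 8-tuple of elements
lemma list_len8 (l : List Char) (h : l.length = 8) :
    ∃ a b c d e f g k, l = [a, b, c, d, e, f, g, k] := by
  rcases l with _ | ⟨a, _ | ⟨b, _ | ⟨c, _ | ⟨d, _ | ⟨e, _ | ⟨f, _ | ⟨g, _ | ⟨k, _ | ⟨x, l⟩⟩⟩⟩⟩⟩⟩⟩⟩ <;>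
    simp_all

-- ===== VERDICT (by name: the statement is the Claim_ definition above) =====
theorem check_birthday_spec : Claim_equal_check_birthday := by
  intro s _
  unfold Spec_check_birthday check_birthday check_birthday_alt
  by_cases hlen : PySem.Str.len s = 8
  · rw [if_pos hlen, if_neg (not_ne_iff.mpr hlen)]
    have hl : s.toList.length = 8 := by rw [PySem.Str.len_eq] at hlen; exact_mod_cast hlen
    obtain ⟨c0, c1, c2, c3, c4, c5, c6, c7, hL⟩ := list_len8 s.toList hl
    rw [hL]
    simp only [show PySem.List.slice [c0, c1, c2, c3, c4, c5, c6, c7] (some 0) (some 2) = [c0, c1] from rfl,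
      show PySem.List.slice [c0, c1, c2, c3, c4, c5, c6, c7] (some 2) (some 4) = [c2, c3] from rfl,
      show PySem.List.slice [c0, c1, c2, c3, c4, c5, c6, c7] (some 4) (some 8) = [c4, c5, c6, c7] from rfl,
      show (PySem.List.pyGet? [c0, c1, c2, c3, c4, c5, c6, c7] 0).getD ' ' = c0 from rfl,
      show (PySem.List.pyGet? [c0, c1, c2, c3, c4, c5, c6, c7] 1).getD ' ' = c1 from rfl,
      show (PySem.List.pyGet? [c0, c1, c2, c3, c4, c5, c6, c7] 2).getD ' ' = c2 from rfl,
      show (PySem.List.pyGet? [c0, c1, c2, c3, c4, c5, c6, c7] 3).getD ' ' = c3 from rfl,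
      show (PySem.List.pyGet? [c0, c1, c2, c3, c4, c5, c6, c7] 4).getD ' ' = c4 from rfl,
      show (PySem.List.pyGet? [c0, c1, c2, c3, c4, c5, c6, c7] 5).getD ' ' = c5 from rfl,
      show (PySem.List.pyGet? [c0, c1, c2, c3, c4, c5, c6, c7] 6).getD ' ' = c6 from rfl,
      show (PySem.List.pyGet? [c0, c1, c2, c3, c4, c5, c6, c7] 7).getD ' ' = c7 from rfl]
    cases hd : PySem.Int.ofChars? [c0, c1] <;>
      cases hm : PySem.Int.ofChars? [c2, c3] <;>
        cases hy : PySem.Int.ofChars? [c4, c5, c6, c7] <;>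
          try rfl
    exact branches_eq s _ _ _
  · rw [if_neg hlen, if_pos (ne_eq _ _ ▸ hlen)]
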